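-- pv_equiv track=rewrite | github.com/ilhmpbta/teori-graf-b-11 | soal-2/soal2.py | dfs_all_paths
-- ===== SOURCE A (Python) =====
-- def dfs_all_paths(start, children, nums):
--     result = []
--     def dfs(path):
--         last = path[-1]
--         extended = False
--         for nxt in children[last]:
--             if nums[nxt] > nums[last]:
--                 extended = True
--                 dfs(path + [nxt])
--         if not extended:
--             result.append(path)
--     dfs([start])
--     return result
-- ===== SOURCE B (Python) =====
-- def dfs_all_paths(start, children, nums):
--     # Iterative DFS with an explicit stack of partial paths (no recursion).
--     result = []
--     stack = [[start]]
--     while stack: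
--         path = stack.pop()
--         last = path[-1]
--         valid = [nxt for nxt in children[last] if nums[nxt] > nums[last]]
--         if not valid:
--             result.append(path)
--         else:
--             for nxt in reversed(valid):
--                 stack.append(path + [nxt])
--     return result
-- ===== Notes on version B (the rewrite author's own statement) =====
-- stated objective: alternative
-- what changed: Replaced the nested recursive dfs closure with a mutable result list by an iterative DFS over an explicit stack of partial paths (children pushed in reverse so leftmost is expanded first).
import Mathlib
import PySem

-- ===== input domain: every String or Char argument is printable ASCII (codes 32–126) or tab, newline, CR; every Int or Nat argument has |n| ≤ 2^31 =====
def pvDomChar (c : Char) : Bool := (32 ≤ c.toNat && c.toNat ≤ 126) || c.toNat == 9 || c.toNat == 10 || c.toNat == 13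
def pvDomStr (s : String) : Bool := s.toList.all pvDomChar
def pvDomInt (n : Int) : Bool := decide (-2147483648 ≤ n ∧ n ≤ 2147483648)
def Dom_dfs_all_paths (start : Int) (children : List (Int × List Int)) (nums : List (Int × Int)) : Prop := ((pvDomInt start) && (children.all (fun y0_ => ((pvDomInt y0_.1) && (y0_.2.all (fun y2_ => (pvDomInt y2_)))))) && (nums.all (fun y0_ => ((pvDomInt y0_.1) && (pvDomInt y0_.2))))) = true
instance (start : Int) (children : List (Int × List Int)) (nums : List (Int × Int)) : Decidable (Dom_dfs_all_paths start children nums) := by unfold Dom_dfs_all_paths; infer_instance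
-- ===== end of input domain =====

-- B replaces A's recursive closure by an iterative DFS over an explicit stack of partial paths
-- (same results, same order); return-value equivalence, neither version mutates its arguments.

-- ===== PORT A =====
-- Recursive dfs of A, with a fuel parameter for totality only: along a path the nums-values
-- strictly increase, so under Pre_ the recursion depth is at most nums.length and the initial
-- fuel nums.length + 1 is never exhausted.  path is nonempty at every call (starts as [start],
-- only grows), so path[-1] is ported as (pyGet? path (-1)).getD 0.
def dfsA (children : List (Int × List Int)) (nums : List (Int × Int)) : Nat → List Int → List (List Int)
  | 0, _ => []
  | fuel+1, path =>
    let last := (PySem.List.pyGet? path (-1)).getD 0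
    -- for nxt in children[last]: if nums[nxt] > nums[last]: extended = True; dfs(path + [nxt])
    let step := (PySem.Dict.getD (PySem.Dict.mk children) last []).foldl
      (fun (st : Bool × List (List Int)) nxt =>
        if PySem.Dict.getD (PySem.Dict.mk nums) nxt 0 > PySem.Dict.getD (PySem.Dict.mk nums) last 0 then
          (true, st.2 ++ dfsA children nums fuel (path ++ [nxt]))
        else st) (false, [])
    if step.1 then step.2 else [path]

def dfs_all_paths (start : Int) (children : List (Int × List Int)) (nums : List (Int × Int)) : List (List Int) :=
  dfsA children nums (nums.length + 1) [start]

-- ===== PORT B =====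
-- helper for the termination measure of runB only (not part of B's algorithm)
def maxChild : List (Int × List Int) → Nat
  | [] => 0
  | e :: t => max e.2.length (maxChild t)

def stackMeasure (C : Nat) (st : List (List Int × Nat)) : Nat :=
  (st.map (fun e => (C + 1) ^ e.2)).sum

theorem getD_mk_length_le_maxChild (children : List (Int × List Int)) (k : Int) :
    (PySem.Dict.getD (PySem.Dict.mk children) k []).length ≤ maxChild children := by
  induction children with
  | nil => simp [PySem.Dict.getD, PySem.Dict.get?]
  | cons e t ih =>
    rw [show PySem.Dict.mk (e :: t) = PySem.Dict.mk ((e.1, e.2) :: t) by rfl]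
    rw [PySem.Dict.getD_eq_get?_getD, PySem.Dict.get?_mk_cons]
    by_cases h : (e.1 == k) = true
    · simp [h, maxChild]
    · rw [if_neg h]
      rw [PySem.Dict.getD_eq_get?_getD] at ih
      simp only [maxChild]
      omega

theorem stackMeasure_tail (C f : Nat) (p : List Int) (rest : List (List Int × Nat)) :
    stackMeasure C rest < stackMeasure C ((p, f) :: rest) := by
  have h : 0 < (C + 1) ^ f := by positivity
  simp only [stackMeasure, List.map_cons, List.sum_cons]
  omega

theorem stackMeasure_step (C f : Nat) (path : List Int) (rest : List (List Int × Nat))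
    (vs : List Int) (h2 : vs.length ≤ C) :
    stackMeasure C (vs.map (fun nxt => (path ++ [nxt], f)) ++ rest)
      < stackMeasure C ((path, f + 1) :: rest) := by
  simp only [stackMeasure, List.map_append, List.sum_append, List.map_map, List.map_cons,
    List.sum_cons]
  have h1 : ((vs.map (fun nxt => (path ++ [nxt], f))).map (fun e => (C + 1) ^ e.2)).sum
      = vs.length * (C + 1) ^ f := by
    simp [List.map_map, Function.comp_def, List.map_const', List.sum_replicate]
  rw [List.map_map] at h1
  rw [h1, pow_succ]
  have h3 : 0 < (C + 1) ^ f := by positivity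
  have h4 : vs.length * (C + 1) ^ f < (C + 1) ^ f * (C + 1) := by nlinarith
  omega

-- Iterative DFS: stack of partial paths, top of stack = head of the list; popping a path and
-- pushing its valid children in reversed order one by one leaves them at the front in their
-- original (leftmost-first) order, i.e. the new stack is valid ++ rest.  Each stack entry
-- carries a fuel bound (totality only, as in port A); a fuel-0 entry is dropped (never reached
-- under Pre_).
def runB (children : List (Int × List Int)) (nums : List (Int × Int)) :
    List (List Int × Nat) → List (List Int)
  | [] => []
  | (_, 0) :: rest => runB children nums rest
  | (path, fuel+1) :: rest =>
    let last := (PySem.List.pyGet? path (-1)).getD 0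
    let valid := (PySem.Dict.getD (PySem.Dict.mk children) last []).filter
      (fun nxt => PySem.Dict.getD (PySem.Dict.mk nums) nxt 0 > PySem.Dict.getD (PySem.Dict.mk nums) last 0)
    if valid.isEmpty then path :: runB children nums rest
    else runB children nums (valid.map (fun nxt => (path ++ [nxt], fuel)) ++ rest)
  termination_by st => stackMeasure (maxChild children) st
  decreasing_by
  · exact stackMeasure_tail _ _ _ _
  · exact stackMeasure_tail _ _ _ _
  · exact stackMeasure_step _ _ _ _ _
      (le_trans (List.length_filter_le _ _) (getD_mk_length_le_maxChild children _))

def dfs_all_paths_alt (start : Int) (children : List (Int × List Int)) (nums : List (Int × Int)) : List (List Int) :=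
  runB children nums [([start], nums.length + 1)]

-- ===== PRECONDITION & SPEC =====
-- Pre_ = exactly the inputs on which A returns (no KeyError): every node reachable from start
-- along strictly-increasing edges must be a key of children and, if its child list is nonempty,
-- it and all its children must be keys of nums.  The reachable SET is a saturated closure
-- (|nums| update rounds suffice: values strictly increase along any path), not A's path recursion.
def succsPre (children : List (Int × List Int)) (nums : List (Int × Int)) (k : Int) : List Int :=
  (PySem.Dict.getD (PySem.Dict.mk children) k []).filter
    (fun v => PySem.Dict.getD (PySem.Dict.mk nums) v 0 > PySem.Dict.getD (PySem.Dict.mk nums) k 0)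

def reachPre (children : List (Int × List Int)) (nums : List (Int × Int)) (start : Int) : List Int :=
  (fun S => PySem.Set.update S (S.flatMap (succsPre children nums)))^[nums.length] [start]

def Pre_dfs_all_paths (start : Int) (children : List (Int × List Int)) (nums : List (Int × Int)) : Prop :=
  ∀ r ∈ reachPre children nums start,
    r ∈ children.map Prod.fst ∧
    (PySem.Dict.getD (PySem.Dict.mk children) r [] = [] ∨
      (r ∈ nums.map Prod.fst ∧
        ∀ v ∈ PySem.Dict.getD (PySem.Dict.mk children) r [], v ∈ nums.map Prod.fst))
instance (start : Int) (children : List (Int × List Int)) (nums : List (Int × Int)) : Decidable (Pre_dfs_all_paths start children nums) := by unfold Pre_dfs_all_paths; infer_instance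

def pvWitness_dfs_all_paths : Int × (List (Int × List Int)) × (List (Int × Int)) :=
  (0, [(0, [1, 2]), (1, []), (2, [1])], [(0, 1), (1, 3), (2, 2)])

def Spec_dfs_all_paths (start : Int) (children : List (Int × List Int)) (nums : List (Int × Int)) (out : List (List Int)) : Prop := out = dfs_all_paths_alt start children nums
instance (start : Int) (children : List (Int × List Int)) (nums : List (Int × Int)) (out : List (List Int)) : Decidable (Spec_dfs_all_paths start children nums out) := by unfold Spec_dfs_all_paths; infer_instance

-- ===== CLAIM (what is proved, stated in full; the proofs are below) =====
def Claim_equal_dfs_all_paths : Prop := ∀ (start : Int) (children : List (Int × List Int)) (nums : List (Int × Int)), Dom_dfs_all_paths start children nums → Pre_dfs_all_paths start children nums → Spec_dfs_all_paths start children nums (dfs_all_paths start children nums)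

-- ===== LEMMAS AND PROOFS =====

-- A's for-loop over children[last] computes (extended, result-chunk) =
-- (is the filtered child list nonempty, flatMap of the recursive results over it).
theorem foldA_eq (children : List (Int × List Int)) (nums : List (Int × Int)) (fuel : Nat)
    (path : List Int) (last : Int) (cs : List Int) (b : Bool) (acc : List (List Int)) :
    cs.foldl (fun (st : Bool × List (List Int)) nxt =>
        if PySem.Dict.getD (PySem.Dict.mk nums) nxt 0 > PySem.Dict.getD (PySem.Dict.mk nums) last 0 then
          (true, st.2 ++ dfsA children nums fuel (path ++ [nxt]))
        else st) (b, acc)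
    = (b || !(cs.filter (fun nxt => PySem.Dict.getD (PySem.Dict.mk nums) nxt 0 > PySem.Dict.getD (PySem.Dict.mk nums) last 0)).isEmpty,
       acc ++ (cs.filter (fun nxt => PySem.Dict.getD (PySem.Dict.mk nums) nxt 0 > PySem.Dict.getD (PySem.Dict.mk nums) last 0)).flatMap
         (fun nxt => dfsA children nums fuel (path ++ [nxt]))) := by
  induction cs generalizing b acc with
  | nil => simp
  | cons h t ih =>
    by_cases hc : PySem.Dict.getD (PySem.Dict.mk nums) h 0 > PySem.Dict.getD (PySem.Dict.mk nums) last 0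
    · simp [List.foldl_cons, hc, ih]
    · simp [List.foldl_cons, hc, ih]

-- the stack semantics refines the recursive semantics entry by entry
theorem runB_cons (children : List (Int × List Int)) (nums : List (Int × Int)) :
    ∀ (fuel : Nat) (path : List Int) (rest : List (List Int × Nat)),
      runB children nums ((path, fuel) :: rest)
        = dfsA children nums fuel path ++ runB children nums rest := by
  intro fuel
  induction fuel with
  | zero => intro path rest; simp [runB, dfsA]
  | succ f ih =>
    intro path rest
    rw [runB, dfsA]
    simp only [foldA_eq, Bool.false_or]
    set last := (PySem.List.pyGet? path (-1)).getD 0 with hlast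
    set valid := (PySem.Dict.getD (PySem.Dict.mk children) last []).filter
      (fun nxt => PySem.Dict.getD (PySem.Dict.mk nums) nxt 0 > PySem.Dict.getD (PySem.Dict.mk nums) last 0) with hvalid
    by_cases he : valid.isEmpty
    · simp [he]
    · simp only [he, Bool.not_false, if_true]
      have push : ∀ (es : List (List Int)) (rest : List (List Int × Nat)),
          runB children nums (es.map (fun p => (p, f)) ++ rest)
            = es.flatMap (dfsA children nums f) ++ runB children nums rest := by
        intro es
        induction es with
        | nil => intro rest; simp
        | cons e t iht => intro rest; simp only [List.map_cons, List.cons_append, ih, iht,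
            List.flatMap_cons, List.append_assoc]
      have := push (valid.map (fun nxt => path ++ [nxt])) rest
      rw [List.map_map] at this
      simpa [List.flatMap_map, Function.comp_def] using this

-- ===== VERDICT (by name: the statement is the Claim_ definition above) =====
theorem dfs_all_paths_spec : Claim_equal_dfs_all_paths := by
  intro start children nums _ _
  unfold Spec_dfs_all_paths dfs_all_paths dfs_all_paths_alt
  rw [runB_cons]
  simp [runB]
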